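-- pv_equiv track=rewrite | github.com/Aman0509/Python_Codes | Practice_Area/clootrack_assessment.py | max_tweet
-- ===== SOURCE A (Python) =====
-- def max_tweet(arr):
--     temp_dict = {}
--     max_tweet_list = ''
--     for k in arr:
--         temp = k.split()
--         if temp_dict.get(temp[0]):
--             temp_dict[temp[0]] += 1
--         else:
--             temp_dict[temp[0]] = 1
--     max_count = list(temp_dict.values()).count(max(temp_dict.values()))
--     if max_count == 1:
--         max_key = max(temp_dict, key=lambda l: temp_dict[l])
--         max_tweet_list = str(max_key) + ' ' + str(temp_dict[max_key])
--     else: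
--         for x in range(max_count):
--             max_key = max(temp_dict, key=lambda l: temp_dict[l])
--             max_tweet_list += str(max_key) + ' ' + str(temp_dict[max_key]) + ','
--             temp_dict.pop(max_key)
--
--     return max_tweet_list.strip(',')
-- ===== SOURCE B (Python) =====
-- def max_tweet(arr):
--     firsts = [s.split()[0] for s in arr]
--     counts = dict.fromkeys(firsts, 0)
--     for w in firsts:
--         counts[w] += 1
--     m = max(counts.values())
--     return ','.join(w + ' ' + str(c) for w, c in counts.items() if c == m).strip(',')
-- ===== Notes on version B (the rewrite author's own statement) =====
-- stated objective: simpler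
-- what changed: B pre-seeds the dict with dict.fromkeys(firsts, 0) and increments unconditionally (no membership branch), and replaces A's repeated max-and-pop selection loop with its max_count==1 special case by a single filter-and-join over the items of maximal count.
import Mathlib
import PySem

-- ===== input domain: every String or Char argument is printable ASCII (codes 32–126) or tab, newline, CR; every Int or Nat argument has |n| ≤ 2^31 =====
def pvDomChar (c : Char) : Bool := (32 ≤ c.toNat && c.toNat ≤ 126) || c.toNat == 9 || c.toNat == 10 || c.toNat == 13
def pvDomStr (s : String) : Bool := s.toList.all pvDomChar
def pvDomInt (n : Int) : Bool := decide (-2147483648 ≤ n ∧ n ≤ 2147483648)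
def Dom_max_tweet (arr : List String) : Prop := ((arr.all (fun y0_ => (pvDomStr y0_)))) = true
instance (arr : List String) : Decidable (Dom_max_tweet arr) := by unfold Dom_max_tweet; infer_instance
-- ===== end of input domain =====

-- B counts by pre-seeding dict.fromkeys(firsts, 0) and bumping unconditionally, then replaces A's
-- repeated max-and-pop selection loop (and its max_count==1 special case) by one filter-and-join: simpler, same values.

-- ===== PORT A =====
-- the 'else' selection loop of A: 'for x in range(max_count): max_key = max(...); append; pop'
def pvLoopA : Nat → PySem.Dict String Int → List Char → List Char
  | 0, _, acc => acc
  | n+1, d, acc =>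
    match PySem.List.max? d.keys (fun l => d.getD l 0) with
    | none => acc  -- Python would raise on an empty dict; never reached under Pre_
    | some mk => pvLoopA n (d.erase mk) (acc ++ mk.toList ++ ' ' :: (PySem.Int.toChars (d.getD mk 0) ++ [',']))

def max_tweet (arr : List String) : String :=
  let d := arr.foldl (fun d k =>
      match PySem.List.pyGet? (PySem.Str.split₀ k) 0 with
      | none => d  -- IndexError 'temp[0]' in Python: excluded by Pre_
      | some w =>
        match d.get? w with
        | some c => if c ≠ 0 then d.insert w (c + 1) else d.insert w 1  -- truthiness of .get()
        | none => d.insert w 1) (PySem.Dict.empty : PySem.Dict String Int)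
  match PySem.List.max? d.values (fun v => v) with
  | none => ""  -- ValueError 'max of empty' in Python (arr = []): excluded by Pre_
  | some mv =>
    let mc := PySem.List.count d.values mv
    if mc = 1 then
      match PySem.List.max? d.keys (fun l => d.getD l 0) with
      | none => ""  -- unreachable: dict nonempty here
      | some mk => String.ofList (PySem.Chars.stripChars (mk.toList ++ ' ' :: PySem.Int.toChars (d.getD mk 0)) [','])
    else
      String.ofList (PySem.Chars.stripChars (pvLoopA mc d []) [','])

-- ===== PORT B =====
def max_tweet_alt (arr : List String) : String :=
  let firsts := arr.map (fun s => (PySem.List.pyGet? (PySem.Str.split₀ s) 0).getD "")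
  let counts := firsts.foldl (fun d w => d.insert w (d.getD w 0 + 1))
      (PySem.Dict.mk ((PySem.List.dedup firsts).map (fun w => (w, (0 : Int)))))  -- dict.fromkeys(firsts, 0)
  match PySem.List.max? counts.values (fun v => v) with
  | none => ""  -- ValueError 'max of empty' in Python (arr = []): excluded by Pre_
  | some m =>
    String.ofList (PySem.Chars.stripChars
      (PySem.Chars.join [','] ((counts.items.filter (fun p => p.2 == m)).map
        (fun p => p.1.toList ++ ' ' :: PySem.Int.toChars p.2))) [','])

-- ===== PRECONDITION & SPEC =====
-- Pre_ excludes exactly the inputs where A raises: the empty list (ValueError from max())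
-- and lists containing an empty/whitespace-only string (IndexError from s.split()[0]).
def Pre_max_tweet (arr : List String) : Prop := arr ≠ [] ∧ ∀ s ∈ arr, PySem.Str.split₀ s ≠ []
instance (arr : List String) : Decidable (Pre_max_tweet arr) := by unfold Pre_max_tweet; infer_instance
def pvWitness_max_tweet : List String := ["go home", "go now", "stay here"]

def Spec_max_tweet (arr : List String) (out : String) : Prop := out = max_tweet_alt arr
instance (arr : List String) (out : String) : Decidable (Spec_max_tweet arr out) := by unfold Spec_max_tweet; infer_instance

-- ===== CLAIM (what is proved, stated in full; the proofs are below) =====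
def Claim_equal_max_tweet : Prop := ∀ (arr : List String), Dom_max_tweet arr → Pre_max_tweet arr → Spec_max_tweet arr (max_tweet arr)

-- ===== LEMMAS AND PROOFS =====

-- step function of PySem.List.max?
def pvStep (key : String → Int) (acc : Option String) (x : String) : Option String :=
  match acc with
  | none => some x
  | some m => if key m < key x then some x else some m

theorem pvStep_foldl_stay (key : String → Int) : ∀ (xs : List String) (a : String),
    (∀ x ∈ xs, key x ≤ key a) → xs.foldl (pvStep key) (some a) = some a := by
  intro xs
  induction xs with
  | nil => intro a _; rfl
  | cons x t ih =>
    intro a h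
    have hx : ¬ key a < key x := not_lt.mpr (h x (by simp))
    simp only [List.foldl_cons, pvStep, if_neg hx]
    exact ih a (fun y hy => h y (by simp [hy]))

theorem pvMaxKeys (key : String → Int) :
    ∀ (l₁ : List (String × Int)) (p : String × Int) (l₂ : List (String × Int)) (acc : Option String),
    (∀ q ∈ l₁, key q.1 < key p.1) → (∀ q ∈ l₂, key q.1 ≤ key p.1) →
    (∀ a, acc = some a → key a < key p.1) →
    ((l₁ ++ p :: l₂).map (fun q => q.1)).foldl (pvStep key) acc = some p.1 := by
  intro l₁
  induction l₁ with
  | nil =>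
    intro p l₂ acc _ h₂ hacc
    have hstep : pvStep key acc p.1 = some p.1 := by
      cases acc with
      | none => rfl
      | some a => simp [pvStep, hacc a rfl]
    simp only [List.nil_append, List.map_cons, List.foldl_cons, hstep]
    exact pvStep_foldl_stay key _ p.1 (by
      intro x hx
      rcases List.mem_map.mp hx with ⟨q, hq, rfl⟩
      exact h₂ q hq)
  | cons q t ih =>
    intro p l₂ acc h₁ h₂ hacc
    simp only [List.cons_append, List.map_cons, List.foldl_cons]
    apply ih p l₂ _ (fun r hr => h₁ r (by simp [hr])) h₂
    intro a ha
    have hq := h₁ q (by simp)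
    cases acc with
    | none =>
      have hb : q.1 = a := by simpa [pvStep] using ha
      exact hb ▸ hq
    | some b =>
      have hb := hacc b rfl
      simp only [pvStep] at ha
      split at ha <;> simp_all

theorem pvMax?_foldl (xs : List String) (key : String → Int) :
    PySem.List.max? xs key = xs.foldl (pvStep key) none := by
  unfold PySem.List.max?
  apply PySem.List.foldl_congr_mem
  intro acc x _
  cases acc <;> rfl

-- first-occurrence split of a list at the first element satisfying P
theorem pvFirstSplit {α : Type} (P : α → Prop) [DecidablePred P] :
    ∀ (l : List α), (∃ x ∈ l, P x) →
    ∃ l₁ x l₂, l = l₁ ++ x :: l₂ ∧ P x ∧ ∀ q ∈ l₁, ¬ P q := by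
  intro l
  induction l with
  | nil => rintro ⟨x, hx, _⟩; simp at hx
  | cons a t ih =>
    intro h
    by_cases ha : P a
    · exact ⟨[], a, t, by simp, ha, by simp⟩
    · rcases h with ⟨x, hx, hP⟩
      rcases List.mem_cons.mp hx with rfl | hxt
      · exact absurd hP ha
      · rcases ih ⟨x, hxt, hP⟩ with ⟨l₁, y, l₂, rfl, hy, hl₁⟩
        exact ⟨a :: l₁, y, l₂, by simp, hy, by
          intro q hq
          rcases List.mem_cons.mp hq with rfl | hq'
          · exact ha
          · exact hl₁ q hq'⟩

theorem pvStrip_append_comma (x : List Char) :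
    PySem.Chars.stripChars (x ++ [',']) [','] = PySem.Chars.stripChars x [','] := by
  have hpq : (fun c : Char => [','].contains c) = (fun c : Char => decide (c = ',')) := by
    funext c; simp
  show (List.dropWhile (fun c => [','].contains c) (List.dropWhile (fun c => [','].contains c) (x ++ [','])).reverse).reverse
     = (List.dropWhile (fun c => [','].contains c) (List.dropWhile (fun c => [','].contains c) x).reverse).reverse
  rw [hpq, List.dropWhile_append]
  rcases hd : List.dropWhile (fun c : Char => decide (c = ',')) x with _ | ⟨a, t⟩
  · simp
  · simp [List.dropWhile_append, List.dropWhile_cons]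

theorem pvFlatMap_comma (blk : (String × Int) → List Char) :
    ∀ (xs : List (String × Int)), xs ≠ [] →
    xs.flatMap (fun p => blk p ++ [',']) = PySem.Chars.join [','] (xs.map blk) ++ [','] := by
  intro xs
  induction xs with
  | nil => intro h; exact absurd rfl h
  | cons a t ih =>
    intro _
    cases t with
    | nil => simp [PySem.Chars.join, List.intercalate]
    | cons b u =>
      have := ih (by simp)
      simp only [List.flatMap_cons] at this ⊢
      rw [this]
      simp only [PySem.Chars.join, List.map_cons, List.intercalate]
      simp [List.intersperse]

-- A's counting loop builds Counter(firsts)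
theorem pvDictEq (arr : List String) (h : ∀ s ∈ arr, PySem.Str.split₀ s ≠ []) :
    arr.foldl (fun d k =>
      match PySem.List.pyGet? (PySem.Str.split₀ k) 0 with
      | none => d
      | some w =>
        match d.get? w with
        | some c => if c ≠ 0 then d.insert w (c + 1) else d.insert w 1
        | none => d.insert w 1) (PySem.Dict.empty : PySem.Dict String Int)
    = PySem.Dict.counter (arr.map (fun s => (PySem.List.pyGet? (PySem.Str.split₀ s) 0).getD "")) := by
  rw [PySem.List.foldl_congr_mem arr _
    (fun d k => d.insert ((PySem.List.pyGet? (PySem.Str.split₀ k) 0).getD "")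
      (d.getD ((PySem.List.pyGet? (PySem.Str.split₀ k) 0).getD "") 0 + 1)) _ ?_]
  · rw [← PySem.Dict.foldl_insert_getD_add_one_eq_counter, List.foldl_map]
  · intro d k hk
    rcases hw : PySem.Str.split₀ k with _ | ⟨w, t⟩
    · exact absurd hw (h k hk)
    · have hp : PySem.List.pyGet? (w :: t) 0 = some w := by
        simp [PySem.List.pyGet?, PySem.List.pyIdx?]
      simp only [hw, hp, Option.getD_some]
      rcases hg : d.get? w with _ | c
      · simp [PySem.Dict.getD_eq_get?_getD, hg]
      · by_cases hc : c = 0 <;> simp [PySem.Dict.getD_eq_get?_getD, hg, hc]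

-- the first key of maximal stored value wins Python's max(dict, key=...)
theorem pvMaxKeysDict (l₁ : List (String × Int)) (p : String × Int) (l₂ : List (String × Int))
    (hnd : (PySem.Dict.mk (l₁ ++ p :: l₂)).keys.Nodup)
    (h₁ : ∀ q ∈ l₁, q.2 < p.2) (h₂ : ∀ q ∈ l₂, q.2 ≤ p.2) :
    PySem.List.max? (PySem.Dict.mk (l₁ ++ p :: l₂)).keys
      (fun k => (PySem.Dict.mk (l₁ ++ p :: l₂)).getD k 0) = some p.1 := by
  have hget : ∀ q ∈ l₁ ++ p :: l₂, (PySem.Dict.mk (l₁ ++ p :: l₂)).getD q.1 0 = q.2 := by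
    intro q hq
    exact PySem.Dict.getD_of_mem_items _ hq hnd 0
  rw [pvMax?_foldl]
  apply pvMaxKeys
  · intro q hq
    rw [hget q (by simp [hq]), hget p (by simp)]
    exact h₁ q hq
  · intro q hq
    rw [hget q (by simp [hq]), hget p (by simp)]
    exact h₂ q hq
  · intro a ha
    cases ha

-- A's selection loop, on a dict given by its items list, produces the comma-terminated blocks
-- of the pairs of maximal value, in order
theorem pvLoopA_eq (mv : Int) : ∀ (n : Nat) (l : List (String × Int)) (acc : List Char),
    (l.map (fun q => q.1)).Nodup →
    (∀ q ∈ l, q.2 ≤ mv) →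
    (l.map (fun q => q.2)).count mv = n →
    pvLoopA n (PySem.Dict.mk l) acc
      = acc ++ (l.filter (fun p => p.2 == mv)).flatMap
          (fun p => (p.1.toList ++ ' ' :: PySem.Int.toChars p.2) ++ [',']) := by
  intro n
  induction n with
  | zero =>
    intro l acc hnd hle hcnt
    have hno : ∀ q ∈ l, ¬ (q.2 = mv) := by
      intro q hq hqm
      have hm : mv ∈ l.map (fun q => q.2) := List.mem_map.mpr ⟨q, hq, hqm⟩
      rw [← List.count_pos_iff] at hm
      omega
    have hf : l.filter (fun p => p.2 == mv) = [] :=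
      List.filter_eq_nil_iff.mpr (by intro q hq; simpa using hno q hq)
    simp [pvLoopA, hf]
  | succ n ih =>
    intro l acc hnd hle hcnt
    have hmem : mv ∈ l.map (fun q => q.2) := by
      rw [← List.count_pos_iff]; omega
    rcases List.mem_map.mp hmem with ⟨p₀, hp₀, hp₀v⟩
    obtain ⟨l₁, p, l₂, rfl, hpv, hl₁⟩ :=
      pvFirstSplit (fun q : String × Int => q.2 = mv) _ ⟨p₀, hp₀, hp₀v⟩
    -- key-uniqueness facts
    rw [List.map_append, List.map_cons] at hnd
    rw [List.nodup_append] at hnd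
    obtain ⟨hnd₁, hnd₂', hdisj⟩ := hnd
    have hp₁ : p.1 ∉ l₁.map (fun q => q.1) := fun hx => hdisj _ hx _ (by simp) rfl
    have hp₂ : p.1 ∉ l₂.map (fun q => q.1) := by
      simpa using (List.nodup_cons.mp hnd₂').1
    -- every stored value is read back by getD
    have hnodk : (PySem.Dict.mk (l₁ ++ p :: l₂)).keys.Nodup := by
      show ((l₁ ++ p :: l₂).map (fun q => q.1)).Nodup
      rw [List.map_append, List.map_cons, List.nodup_append]
      exact ⟨hnd₁, hnd₂', hdisj⟩
    have hget : ∀ q ∈ l₁ ++ p :: l₂, (PySem.Dict.mk (l₁ ++ p :: l₂)).getD q.1 0 = q.2 := by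
      intro q hq
      exact PySem.Dict.getD_of_mem_items _ hq hnodk 0
    -- the first max key is p.1
    have hmax : PySem.List.max? (PySem.Dict.mk (l₁ ++ p :: l₂)).keys
        (fun k => (PySem.Dict.mk (l₁ ++ p :: l₂)).getD k 0) = some p.1 := by
      apply pvMaxKeysDict l₁ p l₂ hnodk
      · intro q hq
        have h1 := hle q (by simp [hq])
        have h2 := hl₁ q hq
        omega
      · intro q hq
        rw [hpv]
        exact hle q (by simp [hq])
    have hgetp : (PySem.Dict.mk (l₁ ++ p :: l₂)).getD p.1 0 = mv := by
      rw [hget p (by simp)]; exact hpv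
    -- erasing p.1 leaves exactly l₁ ++ l₂
    have herase : (PySem.Dict.mk (l₁ ++ p :: l₂)).erase p.1 = PySem.Dict.mk (l₁ ++ l₂) := by
      apply PySem.Dict.ext
      show (l₁ ++ p :: l₂).filter (fun q => !(q.1 == p.1)) = l₁ ++ l₂
      rw [List.filter_append, List.filter_cons]
      have hf₁ : l₁.filter (fun q => !(q.1 == p.1)) = l₁ := by
        apply List.filter_eq_self.mpr
        intro q hq
        simp only [Bool.not_eq_eq_eq_not, Bool.not_true, beq_eq_false_iff_ne]
        exact fun he => hp₁ (List.mem_map.mpr ⟨q, hq, he⟩)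
      have hf₂ : l₂.filter (fun q => !(q.1 == p.1)) = l₂ := by
        apply List.filter_eq_self.mpr
        intro q hq
        simp only [Bool.not_eq_eq_eq_not, Bool.not_true, beq_eq_false_iff_ne]
        exact fun he => hp₂ (List.mem_map.mpr ⟨q, hq, he⟩)
      simp [hf₁, hf₂]
    -- counts for the tail call
    have hcnt₁ : (l₁.map (fun q => q.2)).count mv = 0 := by
      rw [List.count_eq_zero]
      intro hm
      rcases List.mem_map.mp hm with ⟨q, hq, hqv⟩
      exact hl₁ q hq hqv
    have hcnt' : ((l₁ ++ l₂).map (fun q => q.2)).count mv = n := by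
      rw [List.map_append, List.count_append] at hcnt ⊢
      rw [List.map_cons, List.count_cons] at hcnt
      simp [hpv, hcnt₁] at hcnt ⊢
      omega
    have hnd' : ((l₁ ++ l₂).map (fun q => q.1)).Nodup := by
      rw [List.map_append, List.nodup_append]
      refine ⟨hnd₁, (List.nodup_cons.mp hnd₂').2, ?_⟩
      intro a ha b hb
      exact hdisj _ ha _ (by simp [hb])
    have hle' : ∀ q ∈ l₁ ++ l₂, q.2 ≤ mv := by
      intro q hq
      rcases List.mem_append.mp hq with h1 | h1
      · exact hle q (by simp [h1])
      · exact hle q (by simp [h1])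
    -- one unfolding of the loop
    rw [pvLoopA, hmax]
    simp only [hgetp, herase]
    rw [ih (l₁ ++ l₂) _ hnd' hle' hcnt']
    -- assemble both sides
    have hfl : (l₁ ++ p :: l₂).filter (fun p => p.2 == mv)
        = p :: l₂.filter (fun p => p.2 == mv) := by
      rw [List.filter_append, List.filter_cons]
      have hf₁ : l₁.filter (fun p => p.2 == mv) = [] :=
        List.filter_eq_nil_iff.mpr (by intro q hq; simpa using hl₁ q hq)
      simp [hf₁, hpv]
    have hfl' : (l₁ ++ l₂).filter (fun p => p.2 == mv) = l₂.filter (fun p => p.2 == mv) := by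
      rw [List.filter_append]
      have hf₁ : l₁.filter (fun p => p.2 == mv) = [] :=
        List.filter_eq_nil_iff.mpr (by intro q hq; simpa using hl₁ q hq)
      simp [hf₁]
    rw [hfl, hfl', List.flatMap_cons, hpv]
    simp [List.append_assoc]

-- B's increment loop over keys the dict already holds bumps each stored value by its count
theorem pvBumpItems : ∀ (l : List String) (d : PySem.Dict String Int),
    d.keys.Nodup → (∀ x ∈ l, d.contains x = true) →
    (l.foldl (fun d w => d.insert w (d.getD w 0 + 1)) d).items
      = d.items.map (fun p => (p.1, p.2 + (l.count p.1 : Int))) := by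
  intro l
  induction l with
  | nil =>
    intro d _ _
    simp
  | cons x t ih =>
    intro d hnd hc
    have hx := hc x (by simp)
    rw [List.foldl_cons, ih _ (PySem.Dict.nodup_keys_insert d x _ hnd) (by
      intro y hy
      rw [PySem.Dict.contains_insert]
      simp [hc y (by simp [hy])])]
    rw [PySem.Dict.items_insert_of_contains d _ hx, List.map_map]
    apply List.map_congr_left
    intro p hp
    have hgd : d.getD p.1 0 = p.2 := PySem.Dict.getD_of_mem_items _ hp hnd 0
    by_cases he : p.1 = x
    · subst he
      simp only [Function.comp, BEq.rfl, if_pos, hgd, List.count_cons]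
      push_cast
      ring_nf
    · simp only [Function.comp, List.count_cons]
      have hb : (p.1 == x) = false := by simp [he]
      simp [hb]
      exact fun h2 => he h2.symm

-- A's whole selection phase agrees with B's filter-and-join, for a dict with items l
theorem pvSelect (l : List (String × Int)) (mv : Int)
    (hnd : (l.map (fun q => q.1)).Nodup)
    (hmem : mv ∈ l.map (fun q => q.2))
    (hle : ∀ q ∈ l, q.2 ≤ mv) :
    (if PySem.List.count (l.map (fun p => p.2)) mv = 1 then
      match PySem.List.max? (PySem.Dict.mk l).keys (fun k => (PySem.Dict.mk l).getD k 0) with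
      | none => ""
      | some mk => String.ofList (PySem.Chars.stripChars
          (mk.toList ++ ' ' :: PySem.Int.toChars ((PySem.Dict.mk l).getD mk 0)) [','])
     else String.ofList (PySem.Chars.stripChars
          (pvLoopA (PySem.List.count (l.map (fun p => p.2)) mv) (PySem.Dict.mk l) []) [',']))
    = String.ofList (PySem.Chars.stripChars
        (PySem.Chars.join [','] ((l.filter (fun p => p.2 == mv)).map
          (fun p => p.1.toList ++ ' ' :: PySem.Int.toChars p.2))) [',']) := by
  rcases List.mem_map.mp hmem with ⟨p₀, hp₀, hp₀v⟩
  obtain ⟨l₁, p, l₂, rfl, hpv, hl₁⟩ :=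
    pvFirstSplit (fun q : String × Int => q.2 = mv) _ ⟨p₀, hp₀, hp₀v⟩
  have hnodk : (PySem.Dict.mk (l₁ ++ p :: l₂)).keys.Nodup := hnd
  have hfl₁ : l₁.filter (fun q => q.2 == mv) = [] :=
    List.filter_eq_nil_iff.mpr (by intro q hq; simpa using hl₁ q hq)
  have hfilter : (l₁ ++ p :: l₂).filter (fun q => q.2 == mv)
      = p :: l₂.filter (fun q => q.2 == mv) := by
    rw [List.filter_append, List.filter_cons]
    simp [hfl₁, hpv]
  have hcl₁ : (l₁.map (fun q => q.2)).count mv = 0 := by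
    rw [List.count_eq_zero]
    intro hm
    rcases List.mem_map.mp hm with ⟨q, hq, hqv⟩
    exact hl₁ q hq hqv
  by_cases hmc : PySem.List.count ((l₁ ++ p :: l₂).map (fun p => p.2)) mv = 1
  · rw [if_pos hmc]
    -- a unique maximal pair: the filter is exactly [p]
    have hc2 : (l₂.map (fun q => q.2)).count mv = 0 := by
      rw [PySem.List.count_eq, List.map_append, List.count_append,
        List.map_cons, List.count_cons] at hmc
      simp [hpv, hcl₁] at hmc
      omega
    have hfl₂ : l₂.filter (fun q => q.2 == mv) = [] := by
      rw [List.filter_eq_nil_iff]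
      intro q hq hqm
      rw [List.count_eq_zero] at hc2
      exact hc2 (List.mem_map.mpr ⟨q, hq, by simpa using hqm⟩)
    have hmax : PySem.List.max? (PySem.Dict.mk (l₁ ++ p :: l₂)).keys
        (fun k => (PySem.Dict.mk (l₁ ++ p :: l₂)).getD k 0) = some p.1 := by
      apply pvMaxKeysDict l₁ p l₂ hnodk
      · intro q hq
        have h1 := hle q (by simp [hq])
        have h2 := hl₁ q hq
        omega
      · intro q hq
        rw [hpv]
        exact hle q (by simp [hq])
    rw [hmax]
    have hgetp : (PySem.Dict.mk (l₁ ++ p :: l₂)).getD p.1 0 = p.2 :=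
      PySem.Dict.getD_of_mem_items _ (by simp) hnodk 0
    rw [hfilter, hfl₂]
    simp [hgetp, PySem.Chars.join, List.intercalate]
  · rw [if_neg hmc]
    rw [pvLoopA_eq mv _ _ [] hnd hle (by rw [← PySem.List.count_eq])]
    rw [List.nil_append]
    rw [pvFlatMap_comma (fun p => p.1.toList ++ ' ' :: PySem.Int.toChars p.2) _
      (by rw [hfilter]; exact List.cons_ne_nil _ _)]
    rw [pvStrip_append_comma]

-- ===== VERDICT (by name: the statement is the Claim_ definition above) =====
theorem max_tweet_spec : Claim_equal_max_tweet := by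
  unfold Claim_equal_max_tweet
  intro arr _ hpre
  obtain ⟨hne, hsp⟩ := hpre
  show max_tweet arr = max_tweet_alt arr
  simp only [max_tweet, max_tweet_alt]
  rw [pvDictEq arr hsp]
  set firsts := arr.map (fun s => (PySem.List.pyGet? (PySem.Str.split₀ s) 0).getD "") with hfirsts
  set pairs := (PySem.List.dedup firsts).map (fun k => (k, (List.count k firsts : Int))) with hpairs
  have hkeys0 : (PySem.Dict.mk ((PySem.List.dedup firsts).map (fun w => (w, (0 : Int))))).keys
      = PySem.List.dedup firsts := by
    show ((PySem.List.dedup firsts).map (fun w => (w, (0 : Int)))).map (fun p => p.1)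
      = PySem.List.dedup firsts
    rw [List.map_map]
    simp [Function.comp_def]
  have hdB : firsts.foldl (fun d w => d.insert w (d.getD w 0 + 1))
      (PySem.Dict.mk ((PySem.List.dedup firsts).map (fun w => (w, (0 : Int)))))
      = PySem.Dict.mk pairs := by
    apply PySem.Dict.ext
    rw [pvBumpItems firsts _ (by rw [hkeys0]; exact PySem.List.nodup_dedup firsts) (by
      intro x hx
      rw [PySem.Dict.contains_iff_mem_keys, hkeys0, PySem.List.mem_dedup]
      exact hx)]
    show ((PySem.List.dedup firsts).map (fun w => (w, (0 : Int)))).map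
        (fun p => (p.1, p.2 + (firsts.count p.1 : Int))) = pairs
    rw [List.map_map, hpairs]
    apply List.map_congr_left
    intro w _
    simp [List.count]
  have hdA : PySem.Dict.counter firsts = PySem.Dict.mk pairs := by
    apply PySem.Dict.ext
    rw [PySem.Dict.items_counter]
    rw [hpairs, ← PySem.List.dedup_eq_ofList]
  rw [hdA, hdB]
  have hkv : (PySem.Dict.mk pairs).values = pairs.map (fun p => p.2) := rfl
  rw [hkv]
  rcases hmv : PySem.List.max? (pairs.map (fun p => p.2)) (fun v => v) with _ | mv
  · simp only [hmv]
  · simp only [hmv]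
    have hnd : (pairs.map (fun q => q.1)).Nodup := by
      have he : pairs.map (fun q => q.1) = PySem.List.dedup firsts := by
        rw [hpairs, List.map_map]
        simp [Function.comp_def]
      rw [he]
      exact PySem.List.nodup_dedup firsts
    have hmem : mv ∈ pairs.map (fun q => q.2) := PySem.List.max?_mem hmv
    have hle : ∀ q ∈ pairs, q.2 ≤ mv := by
      intro q hq
      exact PySem.List.max?_isMax hmv _ (List.mem_map_of_mem hq)
    exact pvSelect pairs mv hnd hmem hle
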